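-- pv_equiv track=rewrite | github.com/lotrus28/TaboCom | kegg_complementarity/kegg.py | tax_to_acr_dict
-- ===== SOURCE A (Python) =====
-- def tax_to_acr_dict(tax_list, acr_dict):
--     assoc = {}
--     for tax in tax_list:
--         for acr in acr_dict:
--             if tax in acr_dict[acr]:
--                 try:
--                     assoc[acr]
--                 except KeyError:
--                     assoc[acr] = [tax]
--                     continue
--                 assoc[acr].append(tax)
--     return (assoc)
-- ===== SOURCE B (Python) =====
-- def tax_to_acr_dict(tax_list, acr_dict):
--     # Reverse index: member taxon -> list of acr keys whose member list contains it.
--     index = {}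
--     for acr, members in acr_dict.items():
--         for m in dict.fromkeys(members):
--             index.setdefault(m, []).append(acr)
--     assoc = {}
--     for tax in tax_list:
--         for acr in index.get(tax, ()):
--             assoc.setdefault(acr, []).append(tax)
--     return assoc
-- ===== Notes on version B (the rewrite author's own statement) =====
-- stated objective: faster
-- what changed: B replaces A's nested scan of every acr's member list for every tax (with a dict of membership tests per pair) by a reverse index member->acr-keys built once, so each tax does a single hash lookup.
import Mathlib
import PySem

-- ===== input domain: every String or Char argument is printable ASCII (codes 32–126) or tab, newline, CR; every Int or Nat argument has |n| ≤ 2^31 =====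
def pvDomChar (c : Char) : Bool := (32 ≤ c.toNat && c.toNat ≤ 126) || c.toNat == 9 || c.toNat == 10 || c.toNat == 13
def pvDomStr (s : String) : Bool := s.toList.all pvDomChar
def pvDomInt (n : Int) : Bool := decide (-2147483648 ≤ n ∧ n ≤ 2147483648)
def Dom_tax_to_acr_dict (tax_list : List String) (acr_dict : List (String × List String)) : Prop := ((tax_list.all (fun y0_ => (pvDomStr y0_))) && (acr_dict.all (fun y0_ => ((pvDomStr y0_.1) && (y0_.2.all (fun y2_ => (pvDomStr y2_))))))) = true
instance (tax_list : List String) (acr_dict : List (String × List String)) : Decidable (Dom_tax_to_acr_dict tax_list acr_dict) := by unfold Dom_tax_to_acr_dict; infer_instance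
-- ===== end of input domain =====

-- B builds a reverse index (member -> acr keys) once instead of scanning every acr's member
-- list for every tax; equivalence of the return values is proved on dicts with distinct keys.

-- ===== PORT A =====
def tax_to_acr_dict (tax_list : List String) (acr_dict : List (String × List String)) : List (String × List String) :=
  let ad : PySem.Dict String (List String) := PySem.Dict.mk acr_dict
  (tax_list.foldl (fun (assoc : PySem.Dict String (List String)) tax =>
    acr_dict.foldl (fun assoc p =>
      if (ad.getD p.1 []).contains tax then      -- 'if tax in acr_dict[acr]'
        match assoc.get? p.1 with                 -- 'try: assoc[acr] except KeyError: …'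
        | none => assoc.insert p.1 [tax]
        | some _ => assoc.modify p.1 [] (fun l => l ++ [tax])
      else assoc) assoc) PySem.Dict.empty).items

-- ===== PORT B =====
def tax_to_acr_dict_alt (tax_list : List String) (acr_dict : List (String × List String)) : List (String × List String) :=
  let index : PySem.Dict String (List String) :=
    acr_dict.foldl (fun idx p =>
      (PySem.List.dedup p.2).foldl (fun idx m => idx.modify m [] (fun l => l ++ [p.1])) idx)
      PySem.Dict.empty
  (tax_list.foldl (fun (assoc : PySem.Dict String (List String)) tax =>
    (index.getD tax []).foldl (fun assoc acr => assoc.modify acr [] (fun l => l ++ [tax])) assoc)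
    PySem.Dict.empty).items

-- ===== PRECONDITION & SPEC =====
-- Pre_ excludes acr_dict with duplicate keys: such an association list does not represent a
-- Python dict (the Python function's parameter is a dict, whose keys are necessarily distinct).
def Pre_tax_to_acr_dict (tax_list : List String) (acr_dict : List (String × List String)) : Prop :=
  (acr_dict.map (fun p => p.1)).Nodup
instance (tax_list : List String) (acr_dict : List (String × List String)) : Decidable (Pre_tax_to_acr_dict tax_list acr_dict) := by unfold Pre_tax_to_acr_dict; infer_instance
def pvWitness_tax_to_acr_dict : List String × (List (String × List String)) :=
  (["a", "b", "a"], [("K", ["a", "c"]), ("L", ["b", "a"])])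
def Spec_tax_to_acr_dict (tax_list : List String) (acr_dict : List (String × List String)) (out : List (String × List String)) : Prop := out = tax_to_acr_dict_alt tax_list acr_dict
instance (tax_list : List String) (acr_dict : List (String × List String)) (out : List (String × List String)) : Decidable (Spec_tax_to_acr_dict tax_list acr_dict out) := by unfold Spec_tax_to_acr_dict; infer_instance

-- ===== CLAIM (what is proved, stated in full; the proofs are below) =====
def Claim_equal_tax_to_acr_dict : Prop := ∀ (tax_list : List String) (acr_dict : List (String × List String)), Dom_tax_to_acr_dict tax_list acr_dict → Pre_tax_to_acr_dict tax_list acr_dict → Spec_tax_to_acr_dict tax_list acr_dict (tax_to_acr_dict tax_list acr_dict)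

-- ===== LEMMAS AND PROOFS =====

-- the acr keys whose member list contains tax, in dict order
def pvMatchKeys (acr_dict : List (String × List String)) (tax : String) : List String :=
  ((acr_dict.filter (fun p => p.2.contains tax)).map (fun p => p.1))

-- A's try/except body is exactly 'assoc[acr] = assoc.get(acr, []) + [tax]'
theorem pvStepA_eq_modify (assoc : PySem.Dict String (List String)) (k tax : String) :
    (match assoc.get? k with
     | none => assoc.insert k [tax]
     | some _ => assoc.modify k [] (fun l => l ++ [tax])) =
    assoc.modify k [] (fun l => l ++ [tax]) := by
  rcases h : assoc.get? k with _ | v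
  · simp [PySem.Dict.modify, PySem.Dict.getD, h]
  · simp

theorem pvDedup_filter (xs : List String) (tax : String) :
    (PySem.List.dedup xs).filter (fun m => m == tax) =
    (if xs.contains tax then [tax] else []) := by
  rw [List.filter_beq]
  by_cases h : tax ∈ xs
  · rw [List.count_eq_one_of_mem (PySem.List.nodup_dedup xs) ((PySem.List.mem_dedup xs tax).mpr h)]
    simp [h]
  · rw [List.count_eq_zero.mpr (fun hc => h ((PySem.List.mem_dedup xs tax).mp hc))]
    simp [h]

theorem pvMatchKeys_cons (p : String × List String) (rest : List (String × List String)) (tax : String) :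
    pvMatchKeys (p :: rest) tax =
    (if p.2.contains tax then [p.1] else []) ++ pvMatchKeys rest tax := by
  by_cases h : tax ∈ p.2 <;> simp [pvMatchKeys, h]

-- the reverse index answers exactly pvMatchKeys
theorem pvIndex_getD (acr_dict : List (String × List String))
    (idx : PySem.Dict String (List String)) (tax : String) :
    (acr_dict.foldl (fun idx p =>
        (PySem.List.dedup p.2).foldl (fun idx m => idx.modify m [] (fun l => l ++ [p.1])) idx)
      idx).getD tax [] = idx.getD tax [] ++ pvMatchKeys acr_dict tax := by
  induction acr_dict generalizing idx with
  | nil => simp [pvMatchKeys]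
  | cons p rest ih =>
    rw [List.foldl_cons, ih, pvMatchKeys_cons]
    have hstep : ((PySem.List.dedup p.2).foldl
        (fun idx m => idx.modify m [] (fun l => l ++ [p.1])) idx).getD tax [] =
        idx.getD tax [] ++ (if p.2.contains tax then [p.1] else []) := by
      have hm : (PySem.List.dedup p.2).foldl
          (fun idx m => idx.modify m [] (fun l => l ++ [p.1])) idx =
          (((PySem.List.dedup p.2).map (fun m => (m, p.1))).foldl
            (fun (d : PySem.Dict String (List String)) q => d.modify q.1 [] (fun l => l ++ [q.2])) idx) := by
        rw [List.foldl_map]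
      rw [hm, PySem.Dict.getD_foldl_modify_append, List.filter_map]
      have : (PySem.List.dedup p.2).filter ((fun q => q.1 == tax) ∘ (fun m => (m, p.1))) =
          (PySem.List.dedup p.2).filter (fun m => m == tax) := by
        apply List.filter_congr; intro x _; rfl
      rw [this, pvDedup_filter]
      by_cases h : tax ∈ p.2 <;> simp [h]
    rw [hstep, List.append_assoc]

-- A's inner loop over the whole dict is the fold over the matching keys only
theorem pvInnerA (acr_dict : List (String × List String))
    (hnd : (acr_dict.map (fun p => p.1)).Nodup)
    (assoc : PySem.Dict String (List String)) (tax : String) :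
    acr_dict.foldl (fun assoc p =>
      if ((PySem.Dict.mk acr_dict).getD p.1 []).contains tax then
        match assoc.get? p.1 with
        | none => assoc.insert p.1 [tax]
        | some _ => assoc.modify p.1 [] (fun l => l ++ [tax])
      else assoc) assoc =
    (pvMatchKeys acr_dict tax).foldl
      (fun assoc acr => assoc.modify acr [] (fun l => l ++ [tax])) assoc := by
  have h1 : acr_dict.foldl (fun assoc p =>
      if ((PySem.Dict.mk acr_dict).getD p.1 []).contains tax then
        match assoc.get? p.1 with
        | none => assoc.insert p.1 [tax]
        | some _ => assoc.modify p.1 [] (fun l => l ++ [tax])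
      else assoc) assoc =
      acr_dict.foldl (fun assoc p =>
        if p.2.contains tax then assoc.modify p.1 [] (fun l => l ++ [tax]) else assoc) assoc := by
    apply PySem.List.foldl_congr_mem'
    intro p hp acc
    have hget : (PySem.Dict.mk acr_dict).getD p.1 [] = p.2 := by
      apply PySem.Dict.getD_of_mem_items (d := PySem.Dict.mk acr_dict) (k := p.1) (v := p.2)
      · exact hp
      · rw [PySem.Dict.keys_mk]; exact hnd
    rw [hget, pvStepA_eq_modify]
  rw [h1, PySem.List.foldl_if_eq_foldl_filter, pvMatchKeys, List.foldl_map]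

-- ===== VERDICT (by name: the statement is the Claim_ definition above) =====
theorem tax_to_acr_dict_spec : Claim_equal_tax_to_acr_dict := by
  intro tax_list acr_dict _ hpre
  unfold Spec_tax_to_acr_dict tax_to_acr_dict tax_to_acr_dict_alt
  dsimp only
  congr 1
  apply PySem.List.foldl_congr_mem'
  intro tax _ assoc
  rw [pvInnerA acr_dict hpre assoc tax, pvIndex_getD, PySem.Dict.getD_empty]
  simp
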